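-- pv_equiv track=rewrite | github.com/SoorajGhosh/flames_gui | flames_gui.py | omit_char_lst
-- ===== SOURCE A (Python) =====
-- def omit_char_lst(nm1_lst,nm2_lst):
--     char_lst = []
--     #finding the similar chars
--     for indx in range(0,len(nm1_lst)):
--         if nm1_lst[indx] in nm2_lst:
--             if nm1_lst[indx] not in char_lst:    #skipping same char
--                 char_lst.append(nm1_lst[indx])
--             else:
--                 pass
--
--     return char_lst
-- ===== SOURCE B (Python) =====
-- def omit_char_lst(nm1_lst, nm2_lst):
--     # worklist algorithm: repeatedly take the first remaining element, emit it if it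
--     # occurs in nm2_lst, and delete ALL of its occurrences from the remaining list,
--     # so no membership test against the output is ever needed.
--     out = []
--     rest = nm1_lst
--     while rest:
--         head = rest[0]
--         if head in nm2_lst:
--             out.append(head)
--         rest = [x for x in rest[1:] if x != head]
--     return out
-- ===== Notes on version B (the rewrite author's own statement) =====
-- stated objective: alternative
-- what changed: B replaces A's single accumulator pass (which filters by nm2 membership and dedups by scanning the output list so far) with a worklist algorithm: take the first remaining element, emit it if it occurs in nm2, then delete all its occurrences from the remaining input, so duplicates are removed by rewriting the worklist and the output is never searched.
import Mathlib
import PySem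

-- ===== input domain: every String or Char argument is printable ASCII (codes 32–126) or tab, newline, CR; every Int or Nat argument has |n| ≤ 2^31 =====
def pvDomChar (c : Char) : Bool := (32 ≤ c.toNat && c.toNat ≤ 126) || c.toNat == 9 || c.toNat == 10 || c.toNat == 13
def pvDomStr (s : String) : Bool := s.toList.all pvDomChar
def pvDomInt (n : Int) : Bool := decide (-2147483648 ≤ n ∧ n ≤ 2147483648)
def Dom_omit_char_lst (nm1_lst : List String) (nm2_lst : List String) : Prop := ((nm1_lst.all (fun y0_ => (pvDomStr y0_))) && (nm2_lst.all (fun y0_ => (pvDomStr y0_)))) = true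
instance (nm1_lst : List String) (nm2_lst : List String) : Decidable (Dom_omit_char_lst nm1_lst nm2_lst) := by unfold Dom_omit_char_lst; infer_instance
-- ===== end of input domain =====

-- B is an alternative algorithm (not claimed faster): a worklist that emits the head when it
-- occurs in nm2 and deletes all of its occurrences from the remaining input, instead of A's
-- accumulator pass that dedups by scanning the output built so far.
-- ===== PORT A =====
-- A: one pass over nm1_lst; append x when x ∈ nm2_lst and x is not already in char_lst.
def omit_char_lst (nm1_lst : List String) (nm2_lst : List String) : List String :=
  nm1_lst.foldl (fun char_lst x =>
    if nm2_lst.contains x then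
      if char_lst.contains x then char_lst else char_lst ++ [x]
    else char_lst) []

-- ===== PORT B =====
-- B's while loop: take the head of the worklist, emit it if in nm2, delete all its
-- occurrences from the rest of the worklist.
def pvWorklist (nm2_lst : List String) (out : List String) : List String → List String
  | [] => out
  | head :: tl =>
    pvWorklist nm2_lst (if nm2_lst.contains head then out ++ [head] else out)
      (tl.filter (fun x => x != head))
termination_by l => l.length
decreasing_by
  simp only [List.length_unattach, List.length_cons]
  exact Nat.lt_succ_of_le (le_trans (List.length_filter_le _ _) (by simp))

def omit_char_lst_alt (nm1_lst : List String) (nm2_lst : List String) : List String :=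
  pvWorklist nm2_lst [] nm1_lst

-- ===== PRECONDITION & SPEC =====
def Spec_omit_char_lst (nm1_lst : List String) (nm2_lst : List String) (out : List String) : Prop := out = omit_char_lst_alt nm1_lst nm2_lst
instance (nm1_lst : List String) (nm2_lst : List String) (out : List String) : Decidable (Spec_omit_char_lst nm1_lst nm2_lst out) := by unfold Spec_omit_char_lst; infer_instance

-- ===== CLAIM (what is proved, stated in full; the proofs are below) =====
def Claim_equal_omit_char_lst : Prop := ∀ (nm1_lst : List String) (nm2_lst : List String), Dom_omit_char_lst nm1_lst nm2_lst → Spec_omit_char_lst nm1_lst nm2_lst (omit_char_lst nm1_lst nm2_lst)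

-- ===== LEMMAS AND PROOFS =====

lemma pvWorklist_nil (nm2_lst out : List String) : pvWorklist nm2_lst out [] = out := by
  simp [pvWorklist]

lemma pvWorklist_cons (nm2_lst out : List String) (head : String) (tl : List String) :
    pvWorklist nm2_lst out (head :: tl)
      = pvWorklist nm2_lst (if nm2_lst.contains head then out ++ [head] else out)
          (tl.filter (fun x => x != head)) := by
  rw [pvWorklist]

-- deleting all occurrences of an element not in nm2 does not change the worklist result
lemma worklist_skip (nm2_lst : List String) (x : String) (hx : nm2_lst.contains x = false) :
    ∀ (n : Nat) (out l : List String), l.length ≤ n →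
      pvWorklist nm2_lst out (l.filter (fun y => y != x)) = pvWorklist nm2_lst out l := by
  intro n
  induction n with
  | zero =>
    intro out l hl
    have : l = [] := List.eq_nil_of_length_eq_zero (Nat.le_zero.mp hl)
    subst this; rfl
  | succ n ih =>
    intro out l hl
    match l with
    | [] => rfl
    | y :: ys =>
      by_cases hyx : y = x
      · subst hyx
        have h1 : List.filter (fun z => z != y) (y :: ys) = ys.filter (fun z => z != y) := by
          simp
        rw [h1, pvWorklist_cons, hx]
        simp only [if_neg Bool.false_ne_true]
      · have hne : (y != x) = true := by simpa using hyx
        have h1 : List.filter (fun z => z != x) (y :: ys) = y :: ys.filter (fun z => z != x) := by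
          simp [hne]
        rw [h1, pvWorklist_cons, pvWorklist_cons]
        have hcomm : (ys.filter (fun z => z != x)).filter (fun z => z != y)
            = (ys.filter (fun z => z != y)).filter (fun z => z != x) := by
          simp only [List.filter_filter]
          exact List.filter_congr (fun a _ => Bool.and_comm _ _)
        rw [hcomm]
        exact ih _ (ys.filter (fun z => z != y))
          (le_trans (List.length_filter_le _ _) (Nat.le_of_succ_le_succ hl))

-- A's fold from accumulator acc equals the worklist started from acc on the elements not in acc
lemma fold_eq_worklist (nm2_lst : List String) :
    ∀ (l acc : List String),
      l.foldl (fun char_lst x =>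
        if nm2_lst.contains x then
          if char_lst.contains x then char_lst else char_lst ++ [x]
        else char_lst) acc
        = pvWorklist nm2_lst acc (l.filter (fun y => !acc.contains y)) := by
  intro l
  induction l with
  | nil => intro acc; simp [pvWorklist_nil]
  | cons x xs ih =>
    intro acc
    simp only [List.foldl]
    by_cases hm : x ∈ acc
    · have hdrop : List.filter (fun y => !acc.contains y) (x :: xs)
          = xs.filter (fun y => !acc.contains y) := by simp [hm]
      have hstep : (if nm2_lst.contains x = true then
          if acc.contains x = true then acc else acc ++ [x] else acc) = acc := by
        simp [hm]
      rw [hdrop, hstep]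
      exact ih acc
    · have hkeep : List.filter (fun y => !acc.contains y) (x :: xs)
          = x :: xs.filter (fun y => !acc.contains y) := by simp [hm]
      rw [hkeep, pvWorklist_cons]
      have hfilt : xs.filter (fun y => !(acc ++ [x]).contains y)
          = (xs.filter (fun y => !acc.contains y)).filter (fun y => y != x) := by
        simp only [List.filter_filter]
        refine List.filter_congr (fun a _ => ?_)
        by_cases hax : a = x
        · simp [hax]
        · simp [hax]
      by_cases hm2 : x ∈ nm2_lst
      · have hout : (if nm2_lst.contains x = true then acc ++ [x] else acc) = acc ++ [x] := by
          simp [hm2]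
        have hstep : (if nm2_lst.contains x = true then
            if acc.contains x = true then acc else acc ++ [x] else acc) = acc ++ [x] := by
          simp [hm2, hm]
        rw [hstep, hout, ih (acc ++ [x]), hfilt]
      · have hn' : nm2_lst.contains x = false := by simpa using hm2
        have hout : (if nm2_lst.contains x = true then acc ++ [x] else acc) = acc := by
          simp [hm2]
        have hstep : (if nm2_lst.contains x = true then
            if acc.contains x = true then acc else acc ++ [x] else acc) = acc := by
          simp [hm2]
        rw [hstep, hout, ih acc]
        exact (worklist_skip nm2_lst x hn' (xs.filter (fun y => !acc.contains y)).length
          acc _ (le_refl _)).symm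

-- ===== VERDICT (by name: the statement is the Claim_ definition above) =====
theorem omit_char_lst_spec : Claim_equal_omit_char_lst := by
  intro nm1_lst nm2_lst _
  unfold Spec_omit_char_lst omit_char_lst omit_char_lst_alt
  rw [fold_eq_worklist nm2_lst nm1_lst []]
  congr 1
  simp
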